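-- pv_equiv track=rewrite | github.com/c-h-e-m-i/algoritmos-python | dfs.py | dfs
-- ===== SOURCE A (Python) =====
-- def dfs(grafo, ini, fin, pasos, visitado):
--     if ini == fin:  # Si el nodo en el que estamos es nuestro destino, devolvemos el número de pasos
--         return pasos
--
--     visitado[ini] = True  # Si no, lo marcamos como visitado...
--
--     for vecino in grafo[ini]:  # ... y analizamos sus nodos vecinos
--         if not visitado[vecino]:  # Si el vecino que estamos analizando no se ha visitado aún, nos movemos a él
--             res = dfs(grafo, vecino, fin, pasos + 1, visitado)
--             if res >= 0:  # Si dicho vecino nos devuelve un valor >= 0, significa que por su rama se ha llegado al destino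
--                 return res  # Devolvemos, pues, el número de pasos que han sido necesarios para alcanzar dicho destino
--
--     return -1  # Si hemos analizado todos nuestros vecinos (o éramos una hoja) y ninguno ha llegado al destino, devolvemos -1
-- ===== SOURCE B (Python) =====
-- def dfs(grafo, ini, fin, pasos, visitado):
--     if ini == fin:
--         return pasos
--     visitado[ini] = True
--     # iterative DFS: explicit LIFO stack of (node, steps), first adjacency on top
--     stack = [(v, pasos + 1) for v in reversed(grafo[ini]) if not visitado[v]]
--     while stack:
--         node, p = stack.pop()
--         if node == fin:
--             return p
--         if visitado[node]:
--             continue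
--         visitado[node] = True
--         for v in reversed(grafo[node]):
--             if not visitado[v]:
--                 stack.append((v, p + 1))
--     return -1
-- ===== Notes on version B (the rewrite author's own statement) =====
-- stated objective: alternative
-- what changed: A's recursive pre-order DFS (call stack, res>=0 propagation) is replaced by an iterative loop over an explicit LIFO stack of (node, steps) pairs with a pop-time visited re-check; Pre_ excludes inputs on which A raises KeyError and the out-of-purpose corner of a negative initial step count with ini != fin and fin listed as a neighbour, where A's res>=0 found-test discards a reached destination whose running count is still negative while B returns that count.
-- outside the precondition, e.g. on dfs({0: [1], 1: []}, 0, 1, -5, {0: False, 1: False}): A returns -1, B returns -4; on dfs({0: [1, 2]}, 0, 1, 0, {0: False, 1: False}): A returns 1, B raises KeyError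
import Mathlib
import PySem

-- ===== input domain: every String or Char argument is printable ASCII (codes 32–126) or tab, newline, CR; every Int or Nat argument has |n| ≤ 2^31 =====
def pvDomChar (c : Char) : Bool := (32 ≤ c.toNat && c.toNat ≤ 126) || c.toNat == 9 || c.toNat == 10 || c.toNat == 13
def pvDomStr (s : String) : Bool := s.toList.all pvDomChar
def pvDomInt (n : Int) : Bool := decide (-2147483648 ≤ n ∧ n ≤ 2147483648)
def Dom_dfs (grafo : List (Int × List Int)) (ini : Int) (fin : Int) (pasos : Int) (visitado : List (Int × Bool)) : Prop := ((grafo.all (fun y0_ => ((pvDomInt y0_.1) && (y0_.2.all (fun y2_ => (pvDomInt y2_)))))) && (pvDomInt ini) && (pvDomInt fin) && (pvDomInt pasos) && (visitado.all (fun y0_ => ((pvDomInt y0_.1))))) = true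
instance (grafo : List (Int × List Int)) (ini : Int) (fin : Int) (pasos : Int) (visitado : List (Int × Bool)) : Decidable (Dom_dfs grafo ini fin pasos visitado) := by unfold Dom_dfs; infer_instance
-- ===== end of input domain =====

-- B replaces A's recursion by an iterative loop over an explicit LIFO stack (pop-time visited re-check); equivalence is
-- about the RETURN value (both A and B mutate `visitado` in place in Python).

-- ===== PORT A =====
-- Literal port of A's recursion; `fuel` only totalizes it (it is provably never exhausted on the fuel given below).
-- Missing-key lookups (KeyError in Python) are rendered by getD defaults; Pre_ excludes every input on which
-- the Python actually performs such a lookup.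
mutual
def dfsAux (grafo : PySem.Dict Int (List Int)) (fin : Int) (fuel : Nat) (ini : Int) (pasos : Int) (vis : PySem.Dict Int Bool) : Int × PySem.Dict Int Bool :=
  match fuel with
  | 0 => (-1, vis)
  | Nat.succ n =>
    if ini = fin then (pasos, vis)
    else dfsLoop grafo fin n (grafo.getD ini []) pasos (vis.insert ini true)
termination_by (fuel, 0, 0)
def dfsLoop (grafo : PySem.Dict Int (List Int)) (fin : Int) (fuel : Nat) (l : List Int) (pasos : Int) (vis : PySem.Dict Int Bool) : Int × PySem.Dict Int Bool :=
  match l with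
  | [] => (-1, vis)
  | v :: vs =>
    if (vis.getD v false) = false then
      let r := dfsAux grafo fin fuel v (pasos + 1) vis
      if 0 ≤ r.1 then r else dfsLoop grafo fin fuel vs pasos r.2
    else dfsLoop grafo fin fuel vs pasos vis
termination_by (fuel, 1, l.length)
end

def dfs (grafo : List (Int × List Int)) (ini : Int) (fin : Int) (pasos : Int) (visitado : List (Int × Bool)) : Int :=
  (dfsAux (PySem.Dict.mk grafo) fin ((grafo.flatMap Prod.snd).length + 2) ini pasos (PySem.Dict.mk visitado)).1

-- ===== PORT B =====
-- Port of Source B: iterative DFS with an explicit stack (head = top); `fuel` only totalizes the while-loop.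
def dfsBLoop (grafo : PySem.Dict Int (List Int)) (fin : Int) (fuel : Nat) (stack : List (Int × Int)) (vis : PySem.Dict Int Bool) : Int :=
  match fuel with
  | 0 => -1
  | Nat.succ n =>
    match stack with
    | [] => -1
    | (node, p) :: rest =>
      if node = fin then p
      else if vis.getD node false then dfsBLoop grafo fin n rest vis
      else
        let vis1 := vis.insert node true
        dfsBLoop grafo fin n
          (((grafo.getD node []).filter (fun v => !(vis1.getD v false))).map (fun v => (v, p + 1)) ++ rest) vis1

def dfs_alt (grafo : List (Int × List Int)) (ini : Int) (fin : Int) (pasos : Int) (visitado : List (Int × Bool)) : Int :=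
  if ini = fin then pasos
  else
    let g := PySem.Dict.mk grafo
    let vis1 := (PySem.Dict.mk visitado).insert ini true
    let S := (grafo.flatMap Prod.snd).length
    dfsBLoop g fin (S * S + 2 * S + 2)
      (((g.getD ini []).filter (fun v => !(vis1.getD v false))).map (fun v => (v, pasos + 1))) vis1

-- ===== PRECONDITION & SPEC =====
-- Pre_ excludes (a) exactly the inputs on which Python A raises KeyError: the start node missing from grafo (with
-- ini ≠ fin), or — among nodes that can ever be entered, i.e. the start or nodes listed as False in visitado —
-- a listed neighbour missing from visitado, or an enterable listed neighbour (not fin, not visited True) missing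
-- from grafo (this closure is slightly stronger than the part the traversal actually reaches before returning);
-- and (b) the out-of-purpose corner of a negative initial step count (with ini ≠ fin and fin occurring as a
-- listed neighbour, so the destination can be reached), on which A's `res >= 0` found-test discards a reached
-- destination whose running count is still negative — a corner no caller of a step counter specifies; B returns
-- that count there.
def Pre_dfs (grafo : List (Int × List Int)) (ini : Int) (fin : Int) (pasos : Int) (visitado : List (Int × Bool)) : Prop :=
  ini = fin ∨ ((fin ∈ grafo.flatMap Prod.snd → 0 ≤ pasos) ∧ ini ∈ grafo.map Prod.fst ∧
    ∀ q ∈ grafo, (q.1 = ini ∨ (q.1, false) ∈ visitado) →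
      ∀ v ∈ q.2, v ∈ visitado.map Prod.fst ∧
        (v = fin ∨ v ∈ grafo.map Prod.fst ∨ ((v, true) ∈ visitado ∧ (v, false) ∉ visitado)))
instance (grafo : List (Int × List Int)) (ini : Int) (fin : Int) (pasos : Int) (visitado : List (Int × Bool)) : Decidable (Pre_dfs grafo ini fin pasos visitado) := by unfold Pre_dfs; infer_instance

def pvWitness_dfs : (List (Int × List Int)) × Int × Int × Int × (List (Int × Bool)) :=
  ([(0, [1]), (1, [])], 0, 1, 0, [(0, false), (1, false)])

def Spec_dfs (grafo : List (Int × List Int)) (ini : Int) (fin : Int) (pasos : Int) (visitado : List (Int × Bool)) (out : Int) : Prop := out = dfs_alt grafo ini fin pasos visitado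
instance (grafo : List (Int × List Int)) (ini : Int) (fin : Int) (pasos : Int) (visitado : List (Int × Bool)) (out : Int) : Decidable (Spec_dfs grafo ini fin pasos visitado out) := by unfold Spec_dfs; infer_instance

-- ===== CLAIM (what is proved, stated in full; the proofs are below) =====
def Claim_equal_dfs : Prop := ∀ (grafo : List (Int × List Int)) (ini : Int) (fin : Int) (pasos : Int) (visitado : List (Int × Bool)), Dom_dfs grafo ini fin pasos visitado → Pre_dfs grafo ini fin pasos visitado → Spec_dfs grafo ini fin pasos visitado (dfs grafo ini fin pasos visitado)

-- ===== LEMMAS AND PROOFS =====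

-- All listed neighbours, deduplicated; the false-count over it is the termination/fuel measure.
def pvU (grafo : List (Int × List Int)) : List Int := (grafo.flatMap Prod.snd).dedup
def pvS (grafo : List (Int × List Int)) : Nat := (grafo.flatMap Prod.snd).length
def pvCnt (grafo : List (Int × List Int)) (vis : PySem.Dict Int Bool) : Nat :=
  ((pvU grafo).filter (fun k => !(vis.getD k false))).length
def pvLe (vis vis' : PySem.Dict Int Bool) : Prop :=
  ∀ k, vis.getD k false = true → vis'.getD k false = true
def pvPhi (grafo : List (Int × List Int)) (vis : PySem.Dict Int Bool) (stack : List (Int × Int)) : Nat :=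
  stack.length + pvCnt grafo vis * (pvS grafo + 1)

-- A-semantics evaluator of a stack of pending (node, pasos) calls (proof device).
def stackSem (grafo : List (Int × List Int)) (fin : Int) (stack : List (Int × Int)) (vis : PySem.Dict Int Bool) : Int :=
  match stack with
  | [] => -1
  | (v, p) :: rest =>
    if (vis.getD v false) = false then
      let r := dfsAux (PySem.Dict.mk grafo) fin (pvS grafo + 2) v p vis
      if 0 ≤ r.1 then r.1 else stackSem grafo fin rest r.2
    else stackSem grafo fin rest vis

lemma filt_le {α : Type} (p q : α → Bool) :
    ∀ (l : List α), (∀ a ∈ l, q a = true → p a = true) →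
      (l.filter q).length ≤ (l.filter p).length := by
  intro l
  induction l with
  | nil => intro _; simp
  | cons h t ih =>
    intro hpq
    simp only [List.filter_cons]
    have ht := ih (fun a ha => hpq a (List.mem_cons_of_mem _ ha))
    by_cases hq : q h = true
    · rw [hq, hpq h (List.mem_cons_self) hq]; simpa using Nat.succ_le_succ ht
    · simp only [Bool.not_eq_true] at hq
      rw [hq]
      by_cases hp : p h = true
      · rw [hp]; simp; omega
      · simp only [Bool.not_eq_true] at hp; rw [hp]; simpa using ht

lemma filt_lt {α : Type} [DecidableEq α] (p q : α → Bool) :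
    ∀ (l : List α), l.Nodup → ∀ k, k ∈ l → p k = true → q k = false →
      (∀ j, j ≠ k → q j = p j) → (l.filter q).length < (l.filter p).length := by
  intro l
  induction l with
  | nil => intro _ k hk; simp at hk
  | cons h t ih =>
    intro hnd k hk hp hq hagree
    simp only [List.nodup_cons] at hnd
    simp only [List.filter_cons]
    rcases List.mem_cons.mp hk with rfl | hkt
    · rw [hp, hq]
      simp only [Bool.false_eq_true, if_false, if_true]
      simp only [List.length_cons]
      have : (t.filter q).length ≤ (t.filter p).length := by
        apply filt_le
        intro a ha hqa
        rcases eq_or_ne a k with rfl | hne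
        · exact absurd ha hnd.1
        · rw [← hagree a hne]; exact hqa
      omega
    · have hhk : h ≠ k := fun e => hnd.1 (e ▸ hkt)
      rw [hagree h hhk]
      have := ih hnd.2 k hkt hp hq hagree
      by_cases hph : p h = true
      · rw [hph]; simpa using Nat.succ_lt_succ this
      · simp only [Bool.not_eq_true] at hph; rw [hph]; simpa using this

lemma dfsAux_succ (grafo : PySem.Dict Int (List Int)) (fin : Int) (n : Nat) (ini pasos : Int) (vis : PySem.Dict Int Bool) :
    dfsAux grafo fin (n + 1) ini pasos vis =
      if ini = fin then (pasos, vis)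
      else dfsLoop grafo fin n (grafo.getD ini []) pasos (vis.insert ini true) := by
  rw [dfsAux]

lemma pvLe_refl (vis : PySem.Dict Int Bool) : pvLe vis vis := fun _ h => h
lemma pvLe_trans {a b c : PySem.Dict Int Bool} (h1 : pvLe a b) (h2 : pvLe b c) : pvLe a c :=
  fun k h => h2 k (h1 k h)
lemma pvLe_insert (vis : PySem.Dict Int Bool) (k : Int) : pvLe vis (vis.insert k true) := by
  intro j h
  rw [PySem.Dict.getD_insert]
  split_ifs with hj
  · rfl
  · exact h

lemma adj_sub (grafo : List (Int × List Int)) (node : Int) :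
    ∀ v, v ∈ (PySem.Dict.mk grafo).getD node [] → v ∈ grafo.flatMap Prod.snd := by
  induction grafo with
  | nil => intro v hv; simp [PySem.Dict.getD, PySem.Dict.get?] at hv
  | cons h t ih =>
    intro v hv
    rw [PySem.Dict.getD_eq_get?_getD, PySem.Dict.get?_mk_cons] at hv
    simp only [List.flatMap_cons, List.mem_append]
    by_cases hk : h.1 == node
    · left; rw [if_pos hk] at hv; simpa using hv
    · right
      apply ih v
      rw [PySem.Dict.getD_eq_get?_getD]
      simp [hk] at hv ⊢
      exact hv

lemma adj_len (grafo : List (Int × List Int)) (node : Int) :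
    ((PySem.Dict.mk grafo).getD node []).length ≤ pvS grafo := by
  induction grafo with
  | nil => simp [PySem.Dict.getD, PySem.Dict.get?, pvS]
  | cons h t ih =>
    rw [PySem.Dict.getD_eq_get?_getD, PySem.Dict.get?_mk_cons]
    simp only [pvS, List.flatMap_cons, List.length_append]
    by_cases hk : h.1 == node
    · rw [if_pos hk]; simp
    · rw [if_neg hk]
      rw [PySem.Dict.getD_eq_get?_getD] at ih
      simp only [pvS] at ih
      omega

-- monotonicity + preservation of the fin-entry of `vis` through A's recursion
lemma loop_mono_of (grafo : List (Int × List Int)) (fin : Int) (fuel : Nat)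
    (hA : ∀ (ini pasos : Int) (vis : PySem.Dict Int Bool),
      pvLe vis (dfsAux (PySem.Dict.mk grafo) fin fuel ini pasos vis).2 ∧
      (dfsAux (PySem.Dict.mk grafo) fin fuel ini pasos vis).2.getD fin false = vis.getD fin false) :
    ∀ (l : List Int) (pasos : Int) (vis : PySem.Dict Int Bool),
      pvLe vis (dfsLoop (PySem.Dict.mk grafo) fin fuel l pasos vis).2 ∧
      (dfsLoop (PySem.Dict.mk grafo) fin fuel l pasos vis).2.getD fin false = vis.getD fin false := by
  intro l
  induction l with
  | nil => intro pasos vis; rw [dfsLoop]; exact ⟨pvLe_refl _, rfl⟩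
  | cons v vs ih =>
    intro pasos vis
    rw [dfsLoop]
    by_cases hv : (vis.getD v false) = false
    · rw [if_pos hv]
      simp only
      by_cases hr : 0 ≤ (dfsAux (PySem.Dict.mk grafo) fin fuel v (pasos + 1) vis).1
      · rw [if_pos hr]; exact hA v (pasos + 1) vis
      · rw [if_neg hr]
        refine ⟨pvLe_trans (hA v (pasos + 1) vis).1 (ih pasos _).1, ?_⟩
        rw [(ih pasos _).2, (hA v (pasos + 1) vis).2]
    · rw [if_neg hv]; exact ih pasos vis

lemma aux_mono (grafo : List (Int × List Int)) (fin : Int) :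
    ∀ (fuel : Nat) (ini pasos : Int) (vis : PySem.Dict Int Bool),
      pvLe vis (dfsAux (PySem.Dict.mk grafo) fin fuel ini pasos vis).2 ∧
      (dfsAux (PySem.Dict.mk grafo) fin fuel ini pasos vis).2.getD fin false = vis.getD fin false := by
  intro fuel
  induction fuel with
  | zero => intro ini pasos vis; rw [dfsAux]; exact ⟨pvLe_refl _, rfl⟩
  | succ n ihn =>
    intro ini pasos vis
    rw [dfsAux]
    by_cases hf : ini = fin
    · rw [if_pos hf]; exact ⟨pvLe_refl _, rfl⟩
    · rw [if_neg hf]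
      have hl := loop_mono_of grafo fin n ihn ((PySem.Dict.mk grafo).getD ini []) pasos (vis.insert ini true)
      refine ⟨pvLe_trans (pvLe_insert vis ini) hl.1, ?_⟩
      rw [hl.2, PySem.Dict.getD_insert_of_ne _ _ _ (fun e => hf e.symm)]

lemma cnt_anti (grafo : List (Int × List Int)) {vis vis' : PySem.Dict Int Bool} (h : pvLe vis vis') :
    pvCnt grafo vis' ≤ pvCnt grafo vis := by
  apply filt_le
  intro a _ ha
  simp only [Bool.not_eq_eq_eq_not, Bool.not_true] at ha ⊢
  cases hv : vis.getD a false with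
  | false => rfl
  | true => exact absurd (h a hv) (by simp [ha])

lemma cnt_insert_lt (grafo : List (Int × List Int)) {vis : PySem.Dict Int Bool} {k : Int}
    (hU : k ∈ pvU grafo) (hk : vis.getD k false = false) :
    pvCnt grafo (vis.insert k true) < pvCnt grafo vis := by
  apply filt_lt _ _ _ (List.nodup_dedup _) k hU
  · simp [hk]
  · simp [PySem.Dict.getD_insert_self]
  · intro j hj
    rw [PySem.Dict.getD_insert_of_ne _ _ _ hj]

lemma cnt_le_S (grafo : List (Int × List Int)) (vis : PySem.Dict Int Bool) :
    pvCnt grafo vis ≤ pvS grafo := by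
  calc pvCnt grafo vis ≤ (pvU grafo).length := List.length_filter_le _ _
    _ ≤ pvS grafo := (List.dedup_sublist _).length_le

-- fuel stabilization: any two sufficient fuels give the same result
lemma loop_stab_of (grafo : List (Int × List Int)) (fin : Int) (n m : Nat)
    (haux : ∀ (ini pasos : Int) (vis : PySem.Dict Int Bool),
      ini ∈ pvU grafo → vis.getD ini false = false →
      pvCnt grafo vis + 1 ≤ n → pvCnt grafo vis + 1 ≤ m →
      dfsAux (PySem.Dict.mk grafo) fin n ini pasos vis = dfsAux (PySem.Dict.mk grafo) fin m ini pasos vis) :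
    ∀ (l : List Int) (pasos : Int) (vis : PySem.Dict Int Bool),
      (∀ v ∈ l, v ∈ pvU grafo) →
      pvCnt grafo vis + 1 ≤ n → pvCnt grafo vis + 1 ≤ m →
      dfsLoop (PySem.Dict.mk grafo) fin n l pasos vis = dfsLoop (PySem.Dict.mk grafo) fin m l pasos vis := by
  intro l
  induction l with
  | nil => intro pasos vis _ _ _; rw [dfsLoop, dfsLoop]
  | cons v vs ih =>
    intro pasos vis hsub hn hm
    rw [dfsLoop, dfsLoop]
    by_cases hv : (vis.getD v false) = false
    · rw [if_pos hv, if_pos hv]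
      simp only
      rw [← haux v (pasos + 1) vis (hsub v (List.mem_cons_self)) hv hn hm]
      set r := dfsAux (PySem.Dict.mk grafo) fin n v (pasos + 1) vis with hr
      by_cases h0 : 0 ≤ r.1
      · rw [if_pos h0, if_pos h0]
      · rw [if_neg h0, if_neg h0]
        have hc : pvCnt grafo r.2 ≤ pvCnt grafo vis :=
          cnt_anti grafo (aux_mono grafo fin n v (pasos + 1) vis).1
        exact ih pasos r.2 (fun w hw => hsub w (List.mem_cons_of_mem _ hw)) (by omega) (by omega)
    · rw [if_neg hv, if_neg hv]
      exact ih pasos vis (fun w hw => hsub w (List.mem_cons_of_mem _ hw)) hn hm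

lemma aux_stab (grafo : List (Int × List Int)) (fin : Int) :
    ∀ (n m : Nat) (ini pasos : Int) (vis : PySem.Dict Int Bool),
      ini ∈ pvU grafo → vis.getD ini false = false →
      pvCnt grafo vis + 1 ≤ n → pvCnt grafo vis + 1 ≤ m →
      dfsAux (PySem.Dict.mk grafo) fin n ini pasos vis = dfsAux (PySem.Dict.mk grafo) fin m ini pasos vis := by
  intro n
  induction n with
  | zero => intro m ini pasos vis _ _ hn _; omega
  | succ n ihn =>
    intro m ini pasos vis hU hvis hn hm
    match m, hm with
    | Nat.succ m', hm =>
      rw [dfsAux, dfsAux]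
      by_cases hf : ini = fin
      · rw [if_pos hf, if_pos hf]
      · rw [if_neg hf, if_neg hf]
        have hlt := cnt_insert_lt grafo hU hvis
        apply loop_stab_of grafo fin n m' (fun i p w a b c d => ihn m' i p w a b c d)
        · intro w hw
          exact List.mem_dedup.mpr (adj_sub grafo ini w hw)
        · omega
        · omega

-- a batch of sibling calls on the stack evaluates like A's for-loop
lemma stackSem_batch (grafo : List (Int × List Int)) (fin : Int) :
    ∀ (l : List Int) (pasos : Int) (vis : PySem.Dict Int Bool) (rest : List (Int × Int)) (nA : Nat),
      (∀ v ∈ l, v ∈ pvU grafo) → pvCnt grafo vis + 1 ≤ nA →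
      stackSem grafo fin (l.map (fun v => (v, pasos + 1)) ++ rest) vis =
        (if 0 ≤ (dfsLoop (PySem.Dict.mk grafo) fin nA l pasos vis).1
         then (dfsLoop (PySem.Dict.mk grafo) fin nA l pasos vis).1
         else stackSem grafo fin rest (dfsLoop (PySem.Dict.mk grafo) fin nA l pasos vis).2) := by
  intro l
  induction l with
  | nil =>
    intro pasos vis rest nA _ _
    rw [dfsLoop]
    norm_num
  | cons v vs ih =>
    intro pasos vis rest nA hsub hnA
    simp only [List.map_cons, List.cons_append]
    rw [stackSem, dfsLoop]
    by_cases hv : (vis.getD v false) = false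
    · rw [if_pos hv, if_pos hv]
      simp only
      rw [aux_stab grafo fin (pvS grafo + 2) nA v (pasos + 1) vis
        (hsub v (List.mem_cons_self)) hv (by have := cnt_le_S grafo vis; omega) hnA]
      set r := dfsAux (PySem.Dict.mk grafo) fin nA v (pasos + 1) vis with hr
      by_cases h0 : 0 ≤ r.1
      · simp only [if_pos h0]
      · simp only [if_neg h0]
        have hc : pvCnt grafo r.2 ≤ pvCnt grafo vis :=
          cnt_anti grafo (aux_mono grafo fin nA v (pasos + 1) vis).1
        exact ih pasos r.2 rest nA (fun w hw => hsub w (List.mem_cons_of_mem _ hw)) (by omega)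
    · rw [if_neg hv, if_neg hv]
      exact ih pasos vis rest nA (fun w hw => hsub w (List.mem_cons_of_mem _ hw)) hnA

-- dropping at push-time the entries that are already visited does not change stackSem
lemma stackSem_filter (grafo : List (Int × List Int)) (fin : Int) :
    ∀ (l : List Int) (vis0 vis : PySem.Dict Int Bool) (p : Int) (rest : List (Int × Int)),
      pvLe vis0 vis →
      stackSem grafo fin ((l.filter (fun v => !(vis0.getD v false))).map (fun v => (v, p)) ++ rest) vis =
        stackSem grafo fin (l.map (fun v => (v, p)) ++ rest) vis := by
  intro l
  induction l with
  | nil => intro vis0 vis p rest _; rfl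
  | cons v vs ih =>
    intro vis0 vis p rest hle
    simp only [List.filter_cons]
    by_cases h0 : vis0.getD v false = false
    · rw [if_pos (by simp [h0])]
      simp only [List.map_cons, List.cons_append]
      rw [stackSem, stackSem]
      by_cases hv : (vis.getD v false) = false
      · rw [if_pos hv, if_pos hv]
        simp only
        set r := dfsAux (PySem.Dict.mk grafo) fin (pvS grafo + 2) v p vis with hr
        by_cases hx : 0 ≤ r.1
        · rw [if_pos hx, if_pos hx]
        · rw [if_neg hx, if_neg hx]
          exact ih vis0 r.2 p rest
            (pvLe_trans hle (aux_mono grafo fin (pvS grafo + 2) v p vis).1)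
      · rw [if_neg hv, if_neg hv]
        exact ih vis0 vis p rest hle
    · rw [if_neg (by simp [h0])]
      have hvtrue : vis.getD v false = true := by
        apply hle
        cases h : vis0.getD v false with
        | false => exact absurd h h0
        | true => rfl
      rw [List.map_cons, List.cons_append, stackSem]
      rw [if_neg (by simp [hvtrue])]
      exact ih vis0 vis p rest hle

-- the main simulation: B's stack loop = the A-semantics stack evaluator
-- (the invariant carries 0 ≤ p for every stacked count, so A's `0 ≤ res` test is vacuous at a fin-pop)
lemma bloop_eq_stackSem (grafo : List (Int × List Int)) (fin : Int) :
    ∀ (fuelB : Nat) (stack : List (Int × Int)) (vis : PySem.Dict Int Bool),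
      pvPhi grafo vis stack < fuelB →
      (∀ e ∈ stack, e.1 ∈ pvU grafo ∧ (e.1 = fin → vis.getD fin false = false) ∧ (fin ∈ pvU grafo → 0 ≤ e.2)) →
      dfsBLoop (PySem.Dict.mk grafo) fin fuelB stack vis = stackSem grafo fin stack vis := by
  intro fuelB
  induction fuelB with
  | zero => intro stack vis hphi _; exact absurd hphi (Nat.not_lt_zero _)
  | succ n ih =>
    intro stack vis hphi hinv
    match stack with
    | [] => rw [dfsBLoop, stackSem]
    | (node, p) :: rest =>
      have hhead := hinv (node, p) (List.mem_cons_self)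
      rw [dfsBLoop]
      by_cases hfin : node = fin
      · rw [if_pos hfin]
        rw [stackSem]
        have hnf : vis.getD node false = false := by
          subst hfin; exact hhead.2.1 rfl
        rw [if_pos hnf]
        simp only
        have : (pvS grafo + 2) = (pvS grafo + 1) + 1 := rfl
        rw [this, dfsAux_succ, if_pos hfin]
        rw [if_pos (hhead.2.2 (hfin ▸ hhead.1))]
      · rw [if_neg hfin]
        by_cases hv : vis.getD node false
        · rw [if_pos hv]
          have hrest : ∀ e ∈ rest, e.1 ∈ pvU grafo ∧ (e.1 = fin → vis.getD fin false = false) ∧ (fin ∈ pvU grafo → 0 ≤ e.2) :=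
            fun e he => hinv e (List.mem_cons_of_mem _ he)
          rw [ih rest vis (by unfold pvPhi at hphi ⊢; simp at hphi ⊢; omega) hrest]
          rw [stackSem, if_neg (by simp [hv])]
        · rw [if_neg hv]
          simp only [Bool.not_eq_true] at hv
          -- expansion step
          have hU : node ∈ pvU grafo := hhead.1
          have hlt := cnt_insert_lt grafo hU hv
          have hS := cnt_le_S grafo vis
          have hS1 := cnt_le_S grafo (vis.insert node true)
          have hadj := adj_len grafo node
          have hblen : ((((PySem.Dict.mk grafo).getD node []).filter
              (fun v => !((vis.insert node true).getD v false))).map (fun v => (v, p + 1))).length ≤ pvS grafo := by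
            rw [List.length_map]
            exact le_trans (List.length_filter_le _ _) hadj
          have hmul : (pvCnt grafo (vis.insert node true) + 1) * (pvS grafo + 1) ≤
              pvCnt grafo vis * (pvS grafo + 1) := Nat.mul_le_mul_right _ hlt
          rw [Nat.succ_mul] at hmul
          rw [ih _ (vis.insert node true)
            (by
              unfold pvPhi at hphi ⊢
              rw [List.length_append]
              simp only [List.length_cons] at hphi
              omega)
            (by
              intro e he
              rcases List.mem_append.mp he with hb | hr
              · rcases List.mem_map.mp hb with ⟨w, hw, rfl⟩
                have hwf := List.mem_filter.mp hw
                refine ⟨List.mem_dedup.mpr (adj_sub grafo node w hwf.1), ?_, fun hfU => by have := hhead.2.2 hfU; omega⟩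
                intro hwfin
                rw [← hwfin]
                have := hwf.2
                simp only [Bool.not_eq_eq_eq_not, Bool.not_true] at this
                exact this
              · have h3 := hinv e (List.mem_cons_of_mem _ hr)
                refine ⟨h3.1, ?_, h3.2.2⟩
                intro hefin
                rw [PySem.Dict.getD_insert_of_ne _ _ _ (fun e' => hfin e'.symm)]
                exact h3.2.1 hefin)]
          rw [stackSem_filter grafo fin _ _ _ _ _ (pvLe_refl _)]
          rw [stackSem_batch grafo fin _ p _ rest (pvS grafo + 1)
            (fun w hw => List.mem_dedup.mpr (adj_sub grafo node w hw)) (by omega)]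
          rw [stackSem, if_pos hv]
          simp only
          have h2 : (pvS grafo + 2) = (pvS grafo + 1) + 1 := rfl
          rw [h2, dfsAux_succ, if_neg hfin]

lemma loop_res (grafo : List (Int × List Int)) (fin : Int) :
    ∀ (fuel : Nat) (l : List Int) (pasos : Int) (vis : PySem.Dict Int Bool),
      (dfsLoop (PySem.Dict.mk grafo) fin fuel l pasos vis).1 = -1 ∨
        0 ≤ (dfsLoop (PySem.Dict.mk grafo) fin fuel l pasos vis).1 := by
  intro fuel l
  induction l with
  | nil => intro pasos vis; left; rw [dfsLoop]
  | cons v vs ih =>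
    intro pasos vis
    rw [dfsLoop]
    by_cases hv : (vis.getD v false) = false
    · rw [if_pos hv]
      simp only
      by_cases h0 : 0 ≤ (dfsAux (PySem.Dict.mk grafo) fin fuel v (pasos + 1) vis).1
      · rw [if_pos h0]; right; exact h0
      · rw [if_neg h0]; exact ih pasos _
    · rw [if_neg hv]; exact ih pasos vis

-- ===== VERDICT (by name: the statement is the Claim_ definition above) =====
theorem dfs_spec : Claim_equal_dfs := by
  intro grafo ini fin pasos visitado _ hPre
  unfold Spec_dfs dfs dfs_alt
  by_cases hif : ini = fin
  · rw [if_pos hif]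
    rw [show ((grafo.flatMap Prod.snd).length + 2) = ((grafo.flatMap Prod.snd).length + 1) + 1 from rfl,
      dfsAux_succ, if_pos hif]
  · rw [if_neg hif]
    have hp0 : fin ∈ pvU grafo → 0 ≤ pasos := by
      intro hfU
      rcases hPre with h | h
      · exact absurd h hif
      · exact h.1 (List.mem_dedup.mp hfU)
    simp only
    have hS := cnt_le_S grafo ((PySem.Dict.mk visitado).insert ini true)
    have hadj := adj_len grafo ini
    have hmul : pvCnt grafo ((PySem.Dict.mk visitado).insert ini true) * (pvS grafo + 1) ≤
        pvS grafo * (pvS grafo + 1) := Nat.mul_le_mul_right _ hS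
    rw [bloop_eq_stackSem grafo fin _ _ _
      (by
        show _ < pvS grafo * pvS grafo + 2 * pvS grafo + 2
        unfold pvPhi
        rw [List.length_map]
        have hfl := List.length_filter_le (fun v => !(((PySem.Dict.mk visitado).insert ini true).getD v false))
          ((PySem.Dict.mk grafo).getD ini [])
        simp only [Nat.mul_succ] at hmul ⊢
        omega)
      (by
        intro e he
        rcases List.mem_map.mp he with ⟨w, hw, rfl⟩
        have hwf := List.mem_filter.mp hw
        refine ⟨List.mem_dedup.mpr (adj_sub grafo ini w hwf.1), ?_, fun hfU => by have := hp0 hfU; omega⟩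
        intro hwfin
        rw [← hwfin]
        have := hwf.2
        simp only [Bool.not_eq_eq_eq_not, Bool.not_true] at this
        exact this)]
    have hfilt := stackSem_filter grafo fin ((PySem.Dict.mk grafo).getD ini [])
      ((PySem.Dict.mk visitado).insert ini true) ((PySem.Dict.mk visitado).insert ini true)
      (pasos + 1) [] (pvLe_refl _)
    simp only [List.append_nil] at hfilt
    rw [hfilt]
    have hbatch := stackSem_batch grafo fin ((PySem.Dict.mk grafo).getD ini []) pasos
      ((PySem.Dict.mk visitado).insert ini true) [] (pvS grafo + 1)
      (fun w hw => List.mem_dedup.mpr (adj_sub grafo ini w hw)) (by omega)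
    simp only [List.append_nil] at hbatch
    rw [hbatch]
    rw [show ((grafo.flatMap Prod.snd).length + 2) = (pvS grafo + 1) + 1 from rfl,
      dfsAux_succ, if_neg hif]
    rcases loop_res grafo fin (pvS grafo + 1) ((PySem.Dict.mk grafo).getD ini []) pasos
      ((PySem.Dict.mk visitado).insert ini true) with hneg | hpos
    · rw [if_neg (by omega), hneg, stackSem]
    · rw [if_pos hpos]
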